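-- pv_equiv track=rewrite | github.com/jjsupreme7/refundengine | scripts/extract_vendor_profiles.py | _select_examples
-- ===== SOURCE A (Python) =====
-- from collections import Counter, defaultdict
--
-- def _select_examples(rows: list[dict], max_examples: int = 3) -> list[dict]:
--     """Select diverse few-shot examples, preferring rows with analyst notes."""
--     if not rows:
--         return []
--     groups: dict[tuple[str, str], list[dict]] = defaultdict(list)
--     for row in rows:
--         key = (row["tax_category"], row["refund_basis"])
--         groups[key].append(row)
--     sorted_groups = sorted(groups.items(), key=lambda x: len(x[1]), reverse=True)
--     examples = []
--     for _key, group_rows in sorted_groups: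
--         if len(examples) >= max_examples:
--             break
--         best = max(group_rows, key=lambda r: len(r.get("notes", "")))
--         examples.append(best)
--     return examples
-- ===== SOURCE B (Python) =====
-- def _select_examples(rows: list[dict], max_examples: int = 3) -> list[dict]:
--     """Select diverse few-shot examples, preferring rows with analyst notes."""
--     counts = {}
--     reps = {}
--     for row in rows:
--         key = (row["tax_category"], row["refund_basis"])
--         counts[key] = counts.get(key, 0) + 1
--         best = reps.get(key)
--         if best is None or len(row.get("notes", "")) > len(best.get("notes", "")):
--             reps[key] = row
--     order = sorted(counts.items(), key=lambda kv: kv[1], reverse=True)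
--     return [reps[key] for key, _ in order[:max(0, max_examples)]]
-- ===== Notes on version B (the rewrite author's own statement) =====
-- stated objective: alternative
-- what changed: Replaces A's build-all-group-lists dict plus a separate per-group max scan by a single pass that keeps only a count and a running best-notes representative per (tax_category, refund_basis) key, then stably sorts the counts and reads off the stored representatives.
import Mathlib
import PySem

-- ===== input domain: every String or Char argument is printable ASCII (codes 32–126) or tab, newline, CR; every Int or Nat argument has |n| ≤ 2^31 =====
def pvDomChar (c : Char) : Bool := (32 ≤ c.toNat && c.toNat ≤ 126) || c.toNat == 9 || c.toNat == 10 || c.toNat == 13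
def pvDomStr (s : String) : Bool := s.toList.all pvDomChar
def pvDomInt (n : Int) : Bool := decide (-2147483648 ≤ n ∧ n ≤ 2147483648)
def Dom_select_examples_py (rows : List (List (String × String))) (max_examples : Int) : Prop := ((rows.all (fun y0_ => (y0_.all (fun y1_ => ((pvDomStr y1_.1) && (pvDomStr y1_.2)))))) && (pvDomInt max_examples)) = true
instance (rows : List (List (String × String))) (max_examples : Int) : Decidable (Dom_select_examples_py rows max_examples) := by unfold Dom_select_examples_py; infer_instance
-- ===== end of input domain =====

-- B replaces A's group-lists dict + per-group max scan by a single pass keeping a count and a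
-- running best-notes representative per key, then a stable sort of the counts (objective: alternative).


-- ===== PORT A =====
-- shared reading of a Python row dict: row.get(k, "") under the association-list convention (first match)
def pvRowGet (row : List (String × String)) (k : String) : String :=
  ((PySem.Dict.mk row).get? k).getD ""

-- key = (row["tax_category"], row["refund_basis"]) — total here; Pre_ excludes rows missing either key
def pvKey (row : List (String × String)) : String × String :=
  (pvRowGet row "tax_category", pvRowGet row "refund_basis")

def select_examples_py (rows : List (List (String × String))) (max_examples : Int) : List (List (String × String)) :=
  if rows = [] then []
  else
    -- groups[key].append(row)
    let groups : PySem.Dict (String × String) (List (List (String × String))) :=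
      rows.foldl (fun d row => d.modify (pvKey row) [] (· ++ [row])) PySem.Dict.empty
    -- sorted(groups.items(), key=lambda x: len(x[1]), reverse=True)
    let sorted_groups := PySem.List.sorted groups.items (fun x => (x.2.length : Int)) true
    -- the examples loop; the break becomes a no-op guard once len(examples) >= max_examples
    sorted_groups.foldl
      (fun examples g =>
        if (examples.length : Int) ≥ max_examples then examples
        else
          examples ++
            [(PySem.List.max? g.2 (fun r => PySem.Str.len (pvRowGet r "notes"))).getD []])
      []

-- ===== PORT B =====
def select_examples_py_alt (rows : List (List (String × String))) (max_examples : Int) : List (List (String × String)) :=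
  -- one pass: counts[key] = counts.get(key,0)+1; reps[key] = row with strictly longer notes
  let st := rows.foldl
    (fun (st : PySem.Dict (String × String) Int × PySem.Dict (String × String) (List (String × String))) row =>
      let key := pvKey row
      let counts := st.1.insert key (st.1.getD key 0 + 1)
      let reps :=
        match st.2.get? key with
        | none => st.2.insert key row
        | some best =>
            if PySem.Str.len (pvRowGet row "notes") > PySem.Str.len (pvRowGet best "notes") then
              st.2.insert key row
            else st.2
      (counts, reps))
    (PySem.Dict.empty, PySem.Dict.empty)
  -- sorted(counts.items(), key=lambda kv: kv[1], reverse=True), then [reps[k] for k,_ in order[:max(0,m)]]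
  let order := PySem.List.sorted st.1.items (fun kv => kv.2) true
  (order.take max_examples.toNat).map (fun kv => (st.2.get? kv.1).getD [])

-- ===== PRECONDITION & SPEC =====
-- Pre_ excludes rows missing the "tax_category" or "refund_basis" key, on which Python A raises KeyError.
def Pre_select_examples_py (rows : List (List (String × String))) (max_examples : Int) : Prop :=
  ∀ row ∈ rows, "tax_category" ∈ row.map Prod.fst ∧ "refund_basis" ∈ row.map Prod.fst
instance (rows : List (List (String × String))) (max_examples : Int) : Decidable (Pre_select_examples_py rows max_examples) := by unfold Pre_select_examples_py; infer_instance

def pvWitness_select_examples_py : (List (List (String × String))) × Int :=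
  ([[("tax_category", "a"), ("refund_basis", "b"), ("notes", "n")],
    [("tax_category", "a"), ("refund_basis", "b")],
    [("tax_category", "c"), ("refund_basis", "d")]], 2)

def Spec_select_examples_py (rows : List (List (String × String))) (max_examples : Int) (out : List (List (String × String))) : Prop := out = select_examples_py_alt rows max_examples
instance (rows : List (List (String × String))) (max_examples : Int) (out : List (List (String × String))) : Decidable (Spec_select_examples_py rows max_examples out) := by unfold Spec_select_examples_py; infer_instance

-- ===== CLAIM (what is proved, stated in full; the proofs are below) =====
def Claim_equal_select_examples_py : Prop := ∀ (rows : List (List (String × String))) (max_examples : Int), Dom_select_examples_py rows max_examples → Pre_select_examples_py rows max_examples → Spec_select_examples_py rows max_examples (select_examples_py rows max_examples)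

-- ===== LEMMAS AND PROOFS =====

-- notes length of a row, and A's chosen representative of a group (first row with maximal notes length)
def pvNote (r : List (String × String)) : Int := PySem.Str.len (pvRowGet r "notes")
def pvBest (l : List (List (String × String))) : List (String × String) :=
  (PySem.List.max? l pvNote).getD []

-- max? over a snoc: exactly B's strict-> update
theorem max?_snoc {α κ : Type} [LinearOrder κ] (l : List α) (key : α → κ) (x : α) :
    PySem.List.max? (l ++ [x]) key =
      match PySem.List.max? l key with
      | none => some x
      | some m => if key m < key x then some x else some m := by
  simp only [PySem.List.max?, List.foldl_append]
  rfl

-- get? through an items-level map that keeps the keys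
theorem get?_of_items_map {β : Type} (g : PySem.Dict (String × String) (List (List (String × String))))
    (c : PySem.Dict (String × String) β) (f : List (List (String × String)) → β)
    (h : c.items = g.items.map (fun p => (p.1, f p.2))) (hn : g.keys.Nodup) (k : String × String) :
    c.get? k = (g.get? k).map f := by
  have hkeys : c.keys = g.keys := by
    simp only [PySem.Dict.keys, h, List.map_map]; rfl
  cases hg : g.get? k with
  | none =>
      have hk : k ∉ g.keys := (PySem.Dict.get?_eq_none_iff_not_mem_keys g k).mp hg
      have : c.get? k = none := (PySem.Dict.get?_eq_none_iff_not_mem_keys c k).mpr (hkeys ▸ hk)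
      simp [this]
  | some v =>
      have hm : (k, v) ∈ g.items := PySem.Dict.mem_items_of_get?_eq_some g hg
      have hm' : (k, f v) ∈ c.items := by
        rw [h]; exact List.mem_map.mpr ⟨(k, v), hm, rfl⟩
      have := PySem.Dict.get?_of_mem_items c hm' (hkeys ▸ hn)
      simp [this]

-- inserting the mapped value preserves the items-level map relation
theorem items_insert_map {β : Type} (g : PySem.Dict (String × String) (List (List (String × String))))
    (c : PySem.Dict (String × String) β) (f : List (List (String × String)) → β)
    (h : c.items = g.items.map (fun p => (p.1, f p.2))) (k : String × String) (v : List (List (String × String))) :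
    (c.insert k (f v)).items = (g.insert k v).items.map (fun p => (p.1, f p.2)) := by
  have hkeys : c.keys = g.keys := by
    simp only [PySem.Dict.keys, h, List.map_map]; rfl
  have hcont : c.contains k = g.contains k := by
    rw [PySem.Dict.contains_eq_decide_mem_keys, PySem.Dict.contains_eq_decide_mem_keys, hkeys]
  by_cases hg : g.contains k = true
  · rw [PySem.Dict.items_insert_of_contains _ _ (hcont ▸ hg), PySem.Dict.items_insert_of_contains _ _ hg,
      h, List.map_map, List.map_map]
    apply List.map_congr_left
    intro p _
    by_cases hp : p.1 = k <;> simp [hp]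
  · have hg' : g.contains k = false := by simpa using hg
    rw [PySem.Dict.items_insert_of_not_contains _ _ (hcont ▸ hg'), PySem.Dict.items_insert_of_not_contains _ _ hg',
      h, List.map_append]
    simp

-- the loop invariant of B's single pass against A's grouping pass
theorem fold_inv (rows : List (List (String × String))) :
    ∀ (g : PySem.Dict (String × String) (List (List (String × String))))
      (c : PySem.Dict (String × String) Int)
      (r : PySem.Dict (String × String) (List (String × String))),
      c.items = g.items.map (fun p => (p.1, (p.2.length : Int))) →
      r.items = g.items.map (fun p => (p.1, pvBest p.2)) →
      (∀ p ∈ g.items, p.2 ≠ []) → g.keys.Nodup →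
      (let G := rows.foldl (fun d row => d.modify (pvKey row) [] (· ++ [row])) g
       let st := rows.foldl
        (fun (st : PySem.Dict (String × String) Int × PySem.Dict (String × String) (List (String × String))) row =>
          let key := pvKey row
          let counts := st.1.insert key (st.1.getD key 0 + 1)
          let reps :=
            match st.2.get? key with
            | none => st.2.insert key row
            | some best =>
                if PySem.Str.len (pvRowGet row "notes") > PySem.Str.len (pvRowGet best "notes") then
                  st.2.insert key row
                else st.2
          (counts, reps)) (c, r)
       st.1.items = G.items.map (fun p => (p.1, (p.2.length : Int))) ∧
       st.2.items = G.items.map (fun p => (p.1, pvBest p.2)) ∧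
       (∀ p ∈ G.items, p.2 ≠ []) ∧ G.keys.Nodup) := by
  induction rows with
  | nil => intro g c r hc hr hne hnd; exact ⟨hc, hr, hne, hnd⟩
  | cons row rest ih =>
      intro g c r hc hr hne hnd
      simp only [List.foldl_cons]
      set k := pvKey row with hk
      -- the new group value
      have hgetc : c.get? k = (g.get? k).map (fun l => (l.length : Int)) :=
        get?_of_items_map g c _ hc hnd k
      have hgetr : r.get? k = (g.get? k).map pvBest :=
        get?_of_items_map g r pvBest hr hnd k
      apply ih
      · -- counts relation
        have hv : c.getD k 0 + 1 = (((g.getD k [] ++ [row]).length : Int)) := by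
          rw [PySem.Dict.getD_eq_get?_getD, PySem.Dict.getD_eq_get?_getD, hgetc]
          cases g.get? k <;> simp
        rw [PySem.Dict.modify]
        have := items_insert_map g c (fun l => (l.length : Int)) hc k (g.getD k [] ++ [row])
        rw [← hv] at this
        exact this
      · -- reps relation
        rw [PySem.Dict.modify]
        cases hgk : g.get? k with
        | none =>
            have hr0 : r.get? k = none := by rw [hgetr, hgk]; rfl
            have hval : g.getD k [] = [] := by
              rw [PySem.Dict.getD_eq_get?_getD, hgk]; rfl
            have hb : pvBest ([] ++ [row]) = row := by
              simp [pvBest, PySem.List.max?]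
            have := items_insert_map g r pvBest hr k (g.getD k [] ++ [row])
            rw [hval] at this ⊢
            rw [hr0]
            simpa [hb] using this
        | some l =>
            have hr0 : r.get? k = some (pvBest l) := by rw [hgetr, hgk]; rfl
            have hval : g.getD k [] = l := by
              rw [PySem.Dict.getD_eq_get?_getD, hgk]; rfl
            have hlne : l ≠ [] := hne (k, l) (PySem.Dict.mem_items_of_get?_eq_some g hgk)
            obtain ⟨m, hm⟩ : ∃ m, PySem.List.max? l pvNote = some m := by
              cases hx : PySem.List.max? l pvNote with
              | none => exact absurd ((PySem.List.max?_eq_none_iff l pvNote).mp hx) hlne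
              | some m => exact ⟨m, rfl⟩
            have hbl : pvBest l = m := by rw [pvBest, hm]; rfl
            have hsnoc : pvBest (l ++ [row]) = if pvNote m < pvNote row then row else m := by
              rw [pvBest, max?_snoc, hm]
              by_cases hlt : pvNote m < pvNote row <;> simp [hlt]
            rw [hr0, hval]
            simp only [hbl]
            by_cases hlt : pvNote m < pvNote row
            · have hcond : PySem.Str.len (pvRowGet row "notes") > PySem.Str.len (pvRowGet m "notes") := hlt
              rw [if_pos hcond]
              have := items_insert_map g r pvBest hr k (l ++ [row])
              rw [hsnoc, if_pos hlt] at this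
              exact this
            · have hcond : ¬ PySem.Str.len (pvRowGet row "notes") > PySem.Str.len (pvRowGet m "notes") := hlt
              rw [if_neg hcond]
              -- r is unchanged; the replaced item at k still maps to the same best
              by_cases hg : g.contains k = true
              · rw [PySem.Dict.items_insert_of_contains _ _ hg, List.map_map, hr]
                apply List.map_congr_left
                intro p hp
                by_cases hpk : p.1 = k
                · have : g.get? p.1 = some p.2 := PySem.Dict.get?_of_mem_items g hp hnd
                  rw [hpk, hgk] at this
                  have hpl : p.2 = l := by injection this with h; exact h.symm
                  simp [hpk, hpl, hsnoc, if_neg hlt, hbl]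
                · simp [hpk]
              · exfalso
                have : k ∈ g.keys := by
                  have := PySem.Dict.mem_items_of_get?_eq_some g hgk
                  exact List.mem_map.mpr ⟨(k, l), this, rfl⟩
                rw [PySem.Dict.contains_eq_decide_mem_keys] at hg
                simp [this] at hg
      · -- group values stay nonempty
        intro p hp
        rw [PySem.Dict.modify] at hp
        rcases (PySem.Dict.mem_items_insert g k (g.getD k [] ++ [row]) p).mp hp with h1 | h2
        · subst h1; simp
        · exact hne p h2.1
      · -- keys stay nodup
        rw [PySem.Dict.modify]
        exact PySem.Dict.nodup_keys_insert g k _ hnd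

-- insertBy commutes with map when the comparison factors through the map
theorem insertBy_map {α β : Type} (f : α → β) (before : β → β → Bool) (x : α) (l : List α) :
    PySem.List.insertBy before (f x) (l.map f) =
      (PySem.List.insertBy (fun a b => before (f a) (f b)) x l).map f := by
  induction l with
  | nil => rfl
  | cons y ys ih =>
      simp only [List.map_cons, PySem.List.insertBy]
      by_cases h : before (f x) (f y) = true <;> simp [h, ih]

-- sorted commutes with map when the key factors through the map
theorem sorted_map {α β κ : Type} [LT κ] [DecidableLT κ] (f : α → β) (key : β → κ) (l : List α) :
    PySem.List.sorted (l.map f) key true = (PySem.List.sorted l (fun x => key (f x)) true).map f := by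
  simp only [PySem.List.sorted]
  rw [List.foldl_map]
  suffices h : ∀ (acc : List α),
      l.foldl (fun acc x => PySem.List.insertBy (fun a b => decide (key b < key a)) (f x) acc) (acc.map f) =
        (l.foldl (fun acc x => PySem.List.insertBy (fun a b => decide (key (f b) < key (f a))) x acc) acc).map f by
    simpa using h []
  induction l with
  | nil => intro acc; rfl
  | cons y ys ih =>
      intro acc
      simp only [List.foldl_cons]
      rw [insertBy_map f (fun a b => decide (key b < key a)) y acc]
      exact ih _

-- A's guarded accumulation loop is take-then-map
theorem foldl_guard {α β : Type} (m : Int) (gfun : α → β) (l : List α) :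
    ∀ (acc : List β),
      l.foldl (fun ex p => if (ex.length : Int) ≥ m then ex else ex ++ [gfun p]) acc =
        acc ++ (l.take (m.toNat - acc.length)).map gfun := by
  induction l with
  | nil => intro acc; simp
  | cons p rest ih =>
      intro acc
      simp only [List.foldl_cons]
      by_cases h : (acc.length : Int) ≥ m
      · have h0 : m.toNat - acc.length = 0 := by omega
        rw [if_pos h, ih acc, h0]
        simp
      · have h1 : m.toNat - acc.length = (m.toNat - (acc.length + 1)) + 1 := by omega
        rw [if_neg h, ih (acc ++ [gfun p]), h1, List.take_succ_cons]
        simp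
-- ===== VERDICT (by name: the statement is the Claim_ definition above) =====
theorem select_examples_py_spec : Claim_equal_select_examples_py := by
  intro rows max_examples _ _
  show select_examples_py rows max_examples = select_examples_py_alt rows max_examples
  by_cases hrows : rows = []
  · subst hrows
    have hA : select_examples_py [] max_examples = [] := by
      unfold select_examples_py; rw [if_pos rfl]
    have hB : select_examples_py_alt [] max_examples = [] := by
      unfold select_examples_py_alt
      simp [PySem.List.sorted, PySem.Dict.empty]
    rw [hA, hB]
  · have inv := fold_inv rows PySem.Dict.empty PySem.Dict.empty PySem.Dict.empty
      (by rfl) (by rfl) (by intro p hp; simp [PySem.Dict.empty] at hp) PySem.Dict.nodup_keys_empty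
    simp only at inv
    obtain ⟨hc, hr, hne, hnd⟩ := inv
    set G := rows.foldl (fun d row => d.modify (pvKey row) [] (· ++ [row])) PySem.Dict.empty with hG
    set st := rows.foldl
      (fun (st : PySem.Dict (String × String) Int × PySem.Dict (String × String) (List (String × String))) row =>
        let key := pvKey row
        let counts := st.1.insert key (st.1.getD key 0 + 1)
        let reps :=
          match st.2.get? key with
          | none => st.2.insert key row
          | some best =>
              if PySem.Str.len (pvRowGet row "notes") > PySem.Str.len (pvRowGet best "notes") then
                st.2.insert key row
              else st.2
        (counts, reps)) (PySem.Dict.empty, PySem.Dict.empty) with hst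
    have hA : select_examples_py rows max_examples =
        (PySem.List.sorted G.items (fun x => (x.2.length : Int)) true).foldl
          (fun examples g =>
            if (examples.length : Int) ≥ max_examples then examples
            else examples ++
              [(PySem.List.max? g.2 (fun r => PySem.Str.len (pvRowGet r "notes"))).getD []]) [] := by
      unfold select_examples_py
      rw [if_neg hrows]
    have hB : select_examples_py_alt rows max_examples =
        ((PySem.List.sorted st.1.items (fun kv => kv.2) true).take max_examples.toNat).map
          (fun kv => (st.2.get? kv.1).getD []) := by
      unfold select_examples_py_alt
      rfl
    have hsort : PySem.List.sorted st.1.items (fun kv => kv.2) true =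
        (PySem.List.sorted G.items (fun x => (x.2.length : Int)) true).map
          (fun p => (p.1, (p.2.length : Int))) := by
      rw [hc]
      exact sorted_map (fun p => (p.1, (p.2.length : Int))) (fun kv => kv.2) G.items
    rw [hA, hB, hsort, foldl_guard max_examples _ _ []]
    rw [← List.map_take, List.map_map]
    simp only [List.nil_append, List.length_nil, Nat.sub_zero]
    apply List.map_congr_left
    intro p hp
    have hpG : p ∈ G.items := by
      have := List.mem_of_mem_take hp
      rw [PySem.List.mem_sorted] at this
      exact this
    have hget : G.get? p.1 = some p.2 := by
      cases p with
      | mk k v => exact PySem.Dict.get?_of_mem_items G hpG hnd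
    have hrget : st.2.get? p.1 = (G.get? p.1).map pvBest := get?_of_items_map G st.2 pvBest hr hnd p.1
    simp only [Function.comp, hrget, hget, Option.map_some, Option.getD_some]
    rfl
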